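-- pv_equiv track=rewrite | github.com/wilwil186/Coffee | utils/io.py | detect_id_columns
-- ===== SOURCE A (Python) =====
-- from typing import Iterable, Tuple
--
-- def detect_id_columns(cols: Iterable[str]) -> Tuple[str, str | None]:
--     """
--     Detecta columnas de país y tipo con nombres frecuentes; si no, hace fallback.
--     """
--     cols = list(cols)
--     country_map = {"country", "pais", "país"}
--     type_map = {"coffee type", "tipo", "tipo_cafe", "coffee_type", "tipo de café"}
--
--     country_col = None
--     type_col = None
--     for c in cols:
--         cl = c.lower().strip()
--         if cl in country_map:
--             country_col = c
--         if cl in type_map: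
--             type_col = c
--
--     if country_col is None:
--         country_col = cols[0]
--     if type_col is None and len(cols) > 1:
--         type_col = cols[1]
--     return country_col, type_col
-- ===== SOURCE B (Python) =====
-- def detect_id_columns(cols):
--     cols = list(cols)
--     country_map = {"country", "pais", "país"}
--     type_map = {"coffee type", "tipo", "tipo_cafe", "coffee_type", "tipo de café"}
--     # one pass: hash index normalized-name -> (last position, original spelling)
--     last = {}
--     for i, c in enumerate(cols):
--         last[c.lower().strip()] = (i, c)
--     # look the keyword sets up in the index; latest position wins
--     c_hits = [last[k] for k in country_map if k in last]
--     t_hits = [last[k] for k in type_map if k in last]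
--     country_col = max(c_hits)[1] if c_hits else cols[0]
--     type_col = max(t_hits)[1] if t_hits else (cols[1] if len(cols) > 1 else None)
--     return country_col, type_col
-- ===== Notes on version B (the rewrite author's own statement) =====
-- stated objective: alternative
-- what changed: Instead of scanning the columns testing each against the keyword sets, B builds a hash index from normalized column name to (last position, original spelling) in one pass, then resolves each keyword set purely by dictionary lookups, taking the hit with the greatest position (last-match-wins) and the same positional fallbacks.
import Mathlib
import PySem

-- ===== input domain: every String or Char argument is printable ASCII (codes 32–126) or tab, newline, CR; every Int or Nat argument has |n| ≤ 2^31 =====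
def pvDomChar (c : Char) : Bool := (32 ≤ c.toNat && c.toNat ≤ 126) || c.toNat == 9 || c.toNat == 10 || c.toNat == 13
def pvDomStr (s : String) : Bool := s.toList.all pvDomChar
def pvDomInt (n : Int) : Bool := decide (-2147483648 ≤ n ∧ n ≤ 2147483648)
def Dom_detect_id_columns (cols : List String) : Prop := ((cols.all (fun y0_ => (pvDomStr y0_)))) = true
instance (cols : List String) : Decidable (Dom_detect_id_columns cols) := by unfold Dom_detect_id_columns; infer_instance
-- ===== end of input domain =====

-- B replaces A's last-match scan by a one-pass hash index (normalized name -> last position/original) consulted per keyword, taking the greatest position (alternative decomposition, same cost).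


-- ===== PORT A =====
def countryMap : List String := ["country", "pais", "país"]
def typeMap : List String := ["coffee type", "tipo", "tipo_cafe", "coffee_type", "tipo de café"]
-- c.lower().strip()
def normCol (c : String) : String := PySem.Str.strip (PySem.Str.lower c)

def detect_id_columns (cols : List String) : String × Option String :=
  let st := cols.foldl (fun (s : Option String × Option String) c =>
      (if countryMap.contains (normCol c) then some c else s.1,
       if typeMap.contains (normCol c) then some c else s.2)) (none, none)
  let country_col := match st.1 with
    | some c => c
    | none => (PySem.List.pyGet? cols 0).getD ""   -- cols[0]; Pre_ guarantees cols ≠ [], so the getD default is never used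
  let type_col := match st.2 with
    | some c => some c
    | none => if 1 < cols.length then PySem.List.pyGet? cols 1 else none  -- cols[1] only taken when len > 1
  (country_col, type_col)

-- ===== PORT B =====
-- max(...) over (position, name) tuples; exact here because the positions of the hits are pairwise distinct,
-- so Python's lexicographic tuple comparison is decided by the first component alone
def maxPick (m y : Int × String) : Int × String := if m.1 < y.1 then y else m
def maxHit : List (Int × String) → Option (Int × String)
  | [] => none
  | x :: xs => some (xs.foldl maxPick x)

-- the `last` dict built by the for-loop over enumerate(cols)
def lastIndex (cols : List String) : PySem.Dict String (Int × String) :=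
  (PySem.List.enumerate cols).foldl (fun d ic => d.insert (normCol ic.2) ic) PySem.Dict.empty

-- `[last[k] for k in K if k in last]`; Python iterates the set K in an unspecified order, but max over the
-- hits does not depend on the order (distinct positions), so iterating the keyword list order is exact
def detect_id_columns_alt (cols : List String) : String × Option String :=
  let last := lastIndex cols
  let cHits := countryMap.filterMap (fun k => last.get? k)
  let tHits := typeMap.filterMap (fun k => last.get? k)
  let country_col := match maxHit cHits with
    | some x => x.2
    | none => (PySem.List.pyGet? cols 0).getD ""   -- cols[0]; Pre_ guarantees cols ≠ []
  let type_col := match maxHit tHits with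
    | some x => some x.2
    | none => if 1 < cols.length then PySem.List.pyGet? cols 1 else none
  (country_col, type_col)

-- ===== PRECONDITION & SPEC =====
-- Pre_ excludes only the empty list, on which Python A raises IndexError (cols[0]).
def Pre_detect_id_columns (cols : List String) : Prop := cols ≠ []
instance (cols : List String) : Decidable (Pre_detect_id_columns cols) := by unfold Pre_detect_id_columns; infer_instance
def pvWitness_detect_id_columns : List String := (["country", "tipo"])

def Spec_detect_id_columns (cols : List String) (out : String × Option String) : Prop := out = detect_id_columns_alt cols
instance (cols : List String) (out : String × Option String) : Decidable (Spec_detect_id_columns cols out) := by unfold Spec_detect_id_columns; infer_instance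

-- ===== CLAIM =====
def Claim_equal_detect_id_columns : Prop := ∀ (cols : List String), Dom_detect_id_columns cols → Pre_detect_id_columns cols → Spec_detect_id_columns cols (detect_id_columns cols)

-- ===== LEMMAS AND PROOFS =====

-- A's interleaved last-match fold equals the pair of reverse-first-match scans
theorem foldl_pair_lastMatch (p q : String → Bool) (l : List String)
    (s1 s2 : Option String) :
    l.foldl (fun (s : Option String × Option String) c =>
      (if p c then some c else s.1, if q c then some c else s.2)) (s1, s2)
    = ((l.reverse.find? p).elim s1 some, (l.reverse.find? q).elim s2 some) := by
  induction l generalizing s1 s2 with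
  | nil => simp
  | cons a l ih =>
      simp only [List.foldl_cons, List.reverse_cons, List.find?_append, ih, Prod.mk.injEq]
      constructor
      · cases h : l.reverse.find? p with
        | some c => simp
        | none => simp; split <;> simp
      · cases h : l.reverse.find? q with
        | some c => simp
        | none => simp; split <;> simp

-- looking a key up in the insert-fold dict is a reverse-first-match over the enumerated list
theorem get?_insert_fold (l : List (Int × String)) (d : PySem.Dict String (Int × String)) (k : String) :
    (l.foldl (fun d ic => d.insert (normCol ic.2) ic) d).get? k
    = (l.reverse.find? (fun ic => normCol ic.2 == k)).or (d.get? k) := by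
  induction l generalizing d with
  | nil => simp
  | cons a t ih =>
      simp only [List.foldl_cons, List.reverse_cons, List.find?_append, ih]
      cases h : t.reverse.find? (fun ic => normCol ic.2 == k) with
      | some v => simp
      | none =>
          simp only [Option.none_or, List.find?_cons, List.find?_nil]
          rw [PySem.Dict.get?_insert]
          by_cases hk : normCol a.2 = k
          · subst hk
            rw [if_pos rfl, beq_self_eq_true]
            rfl
          · have hb : (normCol a.2 == k) = false := by simp [hk]
            rw [hb, if_neg (fun h' => hk h'.symm)]
            rfl

-- the max-picking fold returns the strictly dominating element
theorem foldl_maxPick_eq (x : Int × String) : ∀ (ys : List (Int × String)) (m : Int × String),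
    x ∈ m :: ys → (∀ y ∈ m :: ys, y ≠ x → y.1 < x.1) → ys.foldl maxPick m = x := by
  intro ys
  induction ys with
  | nil =>
      intro m hx _
      rcases List.mem_cons.mp hx with h | h
      · simp [h]
      · simp at h
  | cons b t ih =>
      intro m hx hlt
      simp only [List.foldl_cons]
      have hmb : maxPick m b = m ∨ maxPick m b = b := by
        unfold maxPick; split <;> simp
      have hxstep : x ∈ maxPick m b :: t := by
        rcases List.mem_cons.mp hx with h | h
        · subst h
          by_cases hb : b = x
          · subst hb; simp [maxPick]
          · have hblt : b.1 < x.1 := hlt b (by simp) hb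
            have : maxPick x b = x := by unfold maxPick; rw [if_neg (by omega)]
            simp [this]
        · rcases List.mem_cons.mp h with h' | h'
          · subst h'
            by_cases hm : m = x
            · subst hm; simp [maxPick]
            · have hmlt : m.1 < x.1 := hlt m (by simp) hm
              have : maxPick m x = x := by unfold maxPick; rw [if_pos hmlt]
              simp [this]
          · simp [h']
      have hlt' : ∀ z ∈ maxPick m b :: t, z ≠ x → z.1 < x.1 := by
        intro z hz hzx
        rcases List.mem_cons.mp hz with rfl | hz'
        · rcases hmb with h' | h'
          · rw [h'] at hzx ⊢; exact hlt m (by simp) hzx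
          · rw [h'] at hzx ⊢; exact hlt b (by simp) hzx
        · exact hlt z (by simp [hz']) hzx
      exact ih (maxPick m b) hxstep hlt'

-- B's dict-lookup-plus-max over a keyword list equals reverse-first-match with the membership predicate
theorem hits_find (K : List String) (cols : List String) :
    maxHit (K.filterMap (fun k => (lastIndex cols).get? k))
    = (PySem.List.enumerate cols).reverse.find? (fun ic => K.contains (normCol ic.2)) := by
  have hget : ∀ k, (lastIndex cols).get? k
      = (PySem.List.enumerate cols).reverse.find? (fun ic => normCol ic.2 == k) := by
    intro k
    unfold lastIndex
    rw [get?_insert_fold]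
    simp
  set rev := (PySem.List.enumerate cols).reverse with hrev
  have hpw : rev.Pairwise (fun a b : Int × String => b.1 < a.1) := by
    rw [hrev, List.pairwise_reverse]
    exact PySem.List.pairwise_lt_enumerate cols 0
  cases h : rev.find? (fun ic => K.contains (normCol ic.2)) with
  | none =>
      have hnone : ∀ ic ∈ rev, ¬ (K.contains (normCol ic.2) = true) :=
        fun ic hic => by
          have := List.find?_eq_none.mp h ic hic; simpa using this
      have : K.filterMap (fun k => (lastIndex cols).get? k) = [] := by
        rw [List.filterMap_eq_nil_iff]
        intro k hk
        rw [hget k]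
        rw [List.find?_eq_none]
        intro ic hic
        simp only [beq_iff_eq]
        intro hkeq
        exact hnone ic hic (by simp [← hkeq] at hk ⊢; exact hk)
      rw [this]; rfl
  | some x =>
      have hPx : K.contains (normCol x.2) = true := by
        have := List.find?_some h; simpa using this
      have hxrev : x ∈ rev := List.mem_of_find?_eq_some h
      obtain ⟨as, bs, hsplit, hfail⟩ :
          ∃ as bs, rev = as ++ x :: bs ∧ ∀ a ∈ as, ¬ ((fun ic => K.contains (normCol ic.2)) a = true) := by
        have := List.find?_eq_some_iff_append.mp h
        obtain ⟨_, as, bs, h1, h2⟩ := this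
        exact ⟨as, bs, h1, fun a ha => by simpa using h2 a ha⟩
      -- x itself is the hit for its own key
      have hfind_k0 : rev.find? (fun ic => normCol ic.2 == normCol x.2) = some x := by
        rw [hsplit, List.find?_append]
        have : as.find? (fun ic => normCol ic.2 == normCol x.2) = none := by
          rw [List.find?_eq_none]
          intro a ha
          simp only [beq_iff_eq]
          intro heq
          exact hfail a ha (by simp only [heq]; exact hPx)
        simp [this]
      have hxhits : x ∈ K.filterMap (fun k => (lastIndex cols).get? k) := by
        rw [List.mem_filterMap]
        refine ⟨normCol x.2, ?_, ?_⟩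
        · simpa [List.contains_iff_mem] using hPx
        · rw [hget]; exact hfind_k0
      -- every hit other than x has a strictly smaller position
      have hdom : ∀ y ∈ K.filterMap (fun k => (lastIndex cols).get? k), y ≠ x → y.1 < x.1 := by
        intro y hy hyx
        rw [List.mem_filterMap] at hy
        obtain ⟨k, hkK, hyk⟩ := hy
        rw [hget] at hyk
        have hyrev : y ∈ rev := List.mem_of_find?_eq_some hyk
        have hyP : K.contains (normCol y.2) = true := by
          have := List.find?_some hyk
          simp only [beq_iff_eq] at this
          simpa [this, List.contains_iff_mem] using hkK
        rw [hsplit] at hyrev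
        rcases List.mem_append.mp hyrev with hin | hin
        · exact absurd hyP (hfail y hin)
        · rcases List.mem_cons.mp hin with heq | hin
          · exact absurd heq hyx
          · have := (List.pairwise_append.mp (hsplit ▸ hpw)).2.1
            exact (List.pairwise_cons.mp this).1 y hin
      cases hh : K.filterMap (fun k => (lastIndex cols).get? k) with
      | nil => rw [hh] at hxhits; simp at hxhits
      | cons h0 t0 =>
          simp only [maxHit]
          exact congrArg some (foldl_maxPick_eq x t0 h0 (hh ▸ hxhits)
            (fun y hy hyx => hdom y (by rw [hh]; exact hy) hyx))

-- finding on the plain list is finding on the enumerated list, projected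
theorem find?_reverse_enumerate (p : String → Bool) (cols : List String) :
    cols.reverse.find? p
    = ((PySem.List.enumerate cols).reverse.find? (fun ic : Int × String => p ic.2)).map (·.2) := by
  conv_lhs => rw [← PySem.List.map_snd_enumerate cols 0, ← List.map_reverse, List.find?_map]
  rfl

-- ===== VERDICT =====
theorem detect_id_columns_spec : Claim_equal_detect_id_columns := by
  intro cols _ _
  unfold Spec_detect_id_columns detect_id_columns detect_id_columns_alt
  simp only [foldl_pair_lastMatch, hits_find,
    find?_reverse_enumerate (fun c => countryMap.contains (normCol c)) cols,
    find?_reverse_enumerate (fun c => typeMap.contains (normCol c)) cols]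
  cases h1 : (PySem.List.enumerate cols).reverse.find? (fun ic => countryMap.contains (normCol ic.2)) <;>
    cases h2 : (PySem.List.enumerate cols).reverse.find? (fun ic => typeMap.contains (normCol ic.2)) <;>
      simp only [Option.map_none, Option.map_some, Option.elim]
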